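-- pv_equiv track=rewrite | github.com/pypi-data/pypi-mirror-402 | packages/drytorch/drytorch-0.1.0rc5.tar.gz/drytorch-0.1.0rc5/tests/functional/trackers/test_initialization_modes.py | _remove_up
-- ===== SOURCE A (Python) =====
-- import itertools
--
-- def _remove_up(text: str) -> str:
--     text = text.replace('\x1b[A\n', '')  # removes up and new line
--     text_split = text.split('\n')
--     new_split = list[str]()
--     for line, next_line in itertools.pairwise(text_split):
--         if '\x1b[A\r' not in next_line:
--             new_split.append(line)
--     new_split.append(text_split[-1])
--     return '\n'.join(new_split)
-- ===== SOURCE B (Python) =====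
-- def _remove_up(text: str) -> str:
--     text = text.replace('\x1b[A\n', '')  # removes up and new line
--     out = []
--     for line in text.split('\n'):
--         if '\x1b[A\r' in line and out:
--             out.pop()
--         out.append(line)
--     return '\n'.join(out)
-- ===== Notes on version B (the rewrite author's own statement) =====
-- stated objective: simpler
-- what changed: Replaces the itertools.pairwise lookahead (keep a line if the next line lacks the cursor-up marker) by a single forward pass using the output list as a stack: a line containing the marker first pops its predecessor, and every line is appended.
import Mathlib
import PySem

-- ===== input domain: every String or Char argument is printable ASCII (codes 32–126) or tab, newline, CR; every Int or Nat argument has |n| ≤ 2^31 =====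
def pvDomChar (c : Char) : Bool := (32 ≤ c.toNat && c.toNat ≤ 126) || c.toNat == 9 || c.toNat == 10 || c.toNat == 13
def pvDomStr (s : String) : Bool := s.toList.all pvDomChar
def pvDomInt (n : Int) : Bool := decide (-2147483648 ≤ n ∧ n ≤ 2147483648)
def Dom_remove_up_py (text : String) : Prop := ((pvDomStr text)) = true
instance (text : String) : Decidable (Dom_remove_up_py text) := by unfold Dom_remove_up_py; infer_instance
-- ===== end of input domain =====

-- B replaces A's pairwise lookahead by a single stack-style pass (a marker line pops its
-- predecessor); same O(n) cost, simpler decomposition. Equivalence proved on all inputs.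

-- ===== PORT A =====
def remove_up_py (text : String) : String :=
  let text := PySem.Str.replace text "\x1b[A\n" ""      -- removes up and new line
  -- sep "\n" ≠ "", so split? is some and getD [] is unreachable: exact
  let text_split := (PySem.Str.split? text "\n").getD []
  let new_split := (text_split.zip text_split.tail).foldl
    (fun acc p => if PySem.Str.isIn "\x1b[A\r" p.2 = false then acc ++ [p.1] else acc) []
  -- text_split[-1]; str.split always returns a nonempty list, so pyGet? is some and getD "" is unreachable
  let new_split := new_split ++ [(PySem.List.pyGet? text_split (-1)).getD ""]
  PySem.Str.join "\n" new_split

-- ===== PORT B =====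
def remove_up_py_alt (text : String) : String :=
  let text := PySem.Str.replace text "\x1b[A\n" ""      -- removes up and new line
  -- sep "\n" ≠ "", so split? is some and getD [] is unreachable: exact
  let out := ((PySem.Str.split? text "\n").getD []).foldl
    (fun out line =>
      (if PySem.Str.isIn "\x1b[A\r" line && !out.isEmpty then out.dropLast else out) ++ [line]) []
  PySem.Str.join "\n" out

-- ===== PRECONDITION & SPEC =====
def Spec_remove_up_py (text : String) (out : String) : Prop := out = remove_up_py_alt text
instance (text : String) (out : String) : Decidable (Spec_remove_up_py text out) := by unfold Spec_remove_up_py; infer_instance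

-- ===== CLAIM (what is proved, stated in full; the proofs are below) =====
def Claim_equal_remove_up_py : Prop := ∀ (text : String), Dom_remove_up_py text → Spec_remove_up_py text (remove_up_py text)

-- ===== LEMMAS AND PROOFS =====

-- the lines A keeps from its pairwise loop (before appending the last line)
def pvKept : List String → List String
  | [] => []
  | [_] => []
  | x :: y :: rest =>
      (if PySem.Str.isIn "\x1b[A\r" y then [] else [x]) ++ pvKept (y :: rest)

-- last element of a list of strings, "" for []
def pvLastD : List String → String
  | [] => ""
  | [x] => x
  | _ :: y :: rest => pvLastD (y :: rest)

theorem pvLA :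
    ∀ (rest : List String) (x : String) (acc : List String),
      ((x :: rest).zip rest).foldl
        (fun acc p => if PySem.Str.isIn "\x1b[A\r" p.2 = false then acc ++ [p.1] else acc) acc
        = acc ++ pvKept (x :: rest) := by
  intro rest
  induction rest with
  | nil => intro x acc; simp [pvKept]
  | cons y r ih =>
    intro x acc
    simp only [List.zip_cons_cons, List.foldl_cons]
    rw [ih y]
    by_cases h : PySem.Chars.isIn ['\x1b', '[', 'A', '\x0d'] y.toList <;> simp [pvKept, h]

theorem pvLB :
    ∀ (rest : List String) (x : String) (acc : List String),
      rest.foldl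
        (fun out line =>
          (if PySem.Str.isIn "\x1b[A\r" line && !out.isEmpty then out.dropLast else out) ++ [line])
        (acc ++ [x])
        = (acc ++ pvKept (x :: rest)) ++ [pvLastD (x :: rest)] := by
  intro rest
  induction rest with
  | nil => intro x acc; simp [pvKept, pvLastD]
  | cons y r ih =>
    intro x acc
    simp only [List.foldl_cons]
    have hstep :
        (if PySem.Str.isIn "\x1b[A\r" y && !(acc ++ [x]).isEmpty
            then (acc ++ [x]).dropLast else acc ++ [x]) ++ [y]
          = (acc ++ (if PySem.Str.isIn "\x1b[A\r" y then [] else [x])) ++ [y] := by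
      by_cases h : PySem.Chars.isIn ['\x1b', '[', 'A', '\x0d'] y.toList <;> simp [h]
    rw [hstep, ih y]
    by_cases h : PySem.Chars.isIn ['\x1b', '[', 'A', '\x0d'] y.toList <;>
      simp [pvKept, pvLastD, h]

theorem pvLast_eq : ∀ (rest : List String) (x : String),
    (PySem.List.pyGet? (x :: rest) (-1)).getD "" = pvLastD (x :: rest) := by
  intro rest
  induction rest with
  | nil => intro x; simp [PySem.List.pyGet?, PySem.List.pyIdx?, pvLastD]
  | cons y r ih =>
    intro x
    rw [pvLastD, ← ih y]
    have h2 : PySem.List.pyGet? (x :: y :: r) (-1) = PySem.List.pyGet? (y :: r) (-1) := by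
      simp [PySem.List.pyGet?, PySem.List.pyIdx?]; rfl
    rw [h2]

-- ===== VERDICT (by name: the statement is the Claim_ definition above) =====
theorem remove_up_py_spec : Claim_equal_remove_up_py := by
  intro text _
  show remove_up_py text = remove_up_py_alt text
  unfold remove_up_py remove_up_py_alt
  dsimp only
  generalize (PySem.Str.split? (PySem.Str.replace text "\x1b[A\n" "") "\n").getD [] = ls
  cases ls with
  | nil => decide
  | cons x rest =>
    rw [pvLast_eq, List.tail_cons, pvLA, List.foldl_cons]
    have h0 :
        (if PySem.Str.isIn "\x1b[A\r" x && !(List.isEmpty ([] : List String))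
            then ([] : List String).dropLast else ([] : List String)) ++ [x]
          = ([] : List String) ++ [x] := by simp
    rw [h0, pvLB]
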